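-- pv_equiv track=rewrite | github.com/Radonchnk/Compare_File_Dumps | gui/analyseData.py | split_array_in_four
-- ===== SOURCE A (Python) =====
-- def split_array_in_four(arr):
--     # Calculate the length of each chunk
--     n = len(arr)
--     chunk_size = n // 4
--     remainder = n % 4
--
--     # Create four sub-arrays
--     sub_arrays = []
--     start = 0
--
--     for i in range(4):
--         # Calculate the end of the current chunk
--         end = start + chunk_size + (1 if remainder > 0 else 0)
--         sub_arrays.append(arr[start:end])
--         start = end
--         remainder -= 1  # Decrease remainder to evenly distribute extra elements
--
--     return sub_arrays
-- ===== SOURCE B (Python) =====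
-- def split_array_in_four(arr):
--     q, r = divmod(len(arr), 4)
--     return [arr[i * q + min(i, r):(i + 1) * q + min(i + 1, r)] for i in range(4)]
-- ===== Notes on version B (the rewrite author's own statement) =====
-- stated objective: simpler
-- what changed: Replaces the sequential start/remainder accumulator loop with a single comprehension whose chunk boundaries are computed in closed form (i*q + min(i, r)).
import Mathlib
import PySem

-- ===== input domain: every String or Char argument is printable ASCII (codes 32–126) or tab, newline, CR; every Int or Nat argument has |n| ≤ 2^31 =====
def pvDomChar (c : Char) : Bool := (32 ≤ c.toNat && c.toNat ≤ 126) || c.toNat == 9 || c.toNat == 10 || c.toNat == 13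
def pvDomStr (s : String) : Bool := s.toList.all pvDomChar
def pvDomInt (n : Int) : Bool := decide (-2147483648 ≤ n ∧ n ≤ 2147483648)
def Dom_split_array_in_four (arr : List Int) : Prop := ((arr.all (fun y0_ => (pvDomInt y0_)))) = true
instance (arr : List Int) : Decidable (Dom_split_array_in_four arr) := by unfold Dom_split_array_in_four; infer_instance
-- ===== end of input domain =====

-- B replaces A's sequential start/remainder accumulator loop with closed-form chunk
-- boundaries i*q + min(i, r); objective: simpler.

-- ===== PORT A =====
def split_array_in_four (arr : List Int) : List (List Int) :=
  let n : Int := PySem.List.len arr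
  let chunk_size : Int := PySem.Int.floordiv n 4
  let remainder : Int := PySem.Int.mod n 4
  ((PySem.List.pyRange 0 4 1).foldl
    (fun (st : List (List Int) × Int × Int) (_i : Int) =>
      let e : Int := st.2.1 + chunk_size + (if st.2.2 > 0 then 1 else 0)
      (st.1 ++ [PySem.List.slice arr (some st.2.1) (some e)], e, st.2.2 - 1))
    ([], 0, remainder)).1

-- ===== PORT B =====
def split_array_in_four_alt (arr : List Int) : List (List Int) :=
  let qr : Int × Int := (PySem.Int.divmod? (PySem.List.len arr) 4).getD (0, 0)
  (PySem.List.pyRange 0 4 1).map (fun i =>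
    PySem.List.slice arr (some (i * qr.1 + min i qr.2)) (some ((i + 1) * qr.1 + min (i + 1) qr.2)))

-- ===== PRECONDITION & SPEC =====
def Spec_split_array_in_four (arr : List Int) (out : List (List Int)) : Prop := out = split_array_in_four_alt arr
instance (arr : List Int) (out : List (List Int)) : Decidable (Spec_split_array_in_four arr out) := by unfold Spec_split_array_in_four; infer_instance

-- ===== CLAIM (what is proved, stated in full; the proofs are below) =====
def Claim_equal_split_array_in_four : Prop := ∀ (arr : List Int), Dom_split_array_in_four arr → Spec_split_array_in_four arr (split_array_in_four arr)

-- ===== LEMMAS AND PROOFS =====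

-- ===== VERDICT (by name: the statement is the Claim_ definition above) =====
theorem split_array_in_four_spec : Claim_equal_split_array_in_four := by
  intro arr _
  unfold Spec_split_array_in_four split_array_in_four split_array_in_four_alt
  have hR : PySem.List.pyRange 0 4 1 = ([0, 1, 2, 3] : List Int) := by decide
  have hq := PySem.Int.floordiv_mul_add_mod (PySem.List.len arr) 4
  have hr0 := PySem.Int.mod_nonneg (PySem.List.len arr) (b := 4) (by omega)
  have hr4 := PySem.Int.mod_lt (PySem.List.len arr) (b := 4) (by omega)
  have hfd : (PySem.List.len arr).fdiv 4 = PySem.Int.floordiv (PySem.List.len arr) 4 := rfl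
  have hfm : (PySem.List.len arr).fmod 4 = PySem.Int.mod (PySem.List.len arr) 4 := rfl
  set q := PySem.Int.floordiv (PySem.List.len arr) 4 with hqdef
  set r := PySem.Int.mod (PySem.List.len arr) 4 with hrdef
  simp only [hR, PySem.Int.divmod?, if_neg (by norm_num : ¬ (4:Int) = 0), Option.getD_some,
    List.foldl, List.map, hfd, hfm, ← hqdef, ← hrdef]
  have key : ∀ (a b a' b' : Int), a = a' → b = b' →
      PySem.List.slice arr (some a) (some b) = PySem.List.slice arr (some a') (some b') := by
    rintro a b a' b' rfl rfl; rfl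
  simp only [List.nil_append, List.cons_append, List.cons.injEq, and_true]
  refine ⟨key _ _ _ _ (by omega) (by split_ifs <;> omega),
          key _ _ _ _ (by split_ifs <;> omega) (by split_ifs <;> omega),
          key _ _ _ _ (by split_ifs <;> omega) (by split_ifs <;> omega),
          key _ _ _ _ (by split_ifs <;> omega) (by split_ifs <;> omega)⟩
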